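-- pv_equiv track=rewrite | github.com/sktkddn777/TIL | algorithm/programmers/level1/약수의 개수와 덧셈.py | is_yaksu
-- ===== SOURCE A (Python) =====
-- def is_yaksu(num):
--   count = 0
--   for i in range(1, num+1):
--     if num % i == 0:
--       count += 1
--
--   if count %2 == 0:
--     return True
--   return False
-- ===== SOURCE B (Python) =====
-- def is_yaksu(num):
--     i = 1
--     while i * i < num:
--         i += 1
--     return i * i != num
-- ===== Notes on version B (the rewrite author's own statement) =====
-- stated objective: faster
-- what changed: Replaces the O(n) divisor-counting loop by an O(sqrt n) search for the least i with i*i >= num: the divisor count is even exactly when num is not a perfect square.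
import Mathlib
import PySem

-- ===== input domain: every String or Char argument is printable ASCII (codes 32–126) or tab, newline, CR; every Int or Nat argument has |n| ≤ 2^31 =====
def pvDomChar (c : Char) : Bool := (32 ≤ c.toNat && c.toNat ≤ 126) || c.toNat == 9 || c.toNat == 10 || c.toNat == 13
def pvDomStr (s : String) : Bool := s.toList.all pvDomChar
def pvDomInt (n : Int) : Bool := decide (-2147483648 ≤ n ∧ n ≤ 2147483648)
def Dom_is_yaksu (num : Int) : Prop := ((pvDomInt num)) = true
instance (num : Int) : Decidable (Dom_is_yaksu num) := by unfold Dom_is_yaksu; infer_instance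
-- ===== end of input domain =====

-- B replaces A's O(num) divisor-counting loop by an O(sqrt num) search for the least
-- i ≥ 1 with i*i ≥ num: the divisor count is even exactly when num is not a perfect square.

-- ===== PORT A =====
def is_yaksu (num : Int) : Bool :=
  let count : Int := (PySem.List.pyRange 1 (num + 1) 1).foldl
    (fun count i => if PySem.Int.mod num i == 0 then count + 1 else count) 0
  if PySem.Int.mod count 2 == 0 then true else false

-- ===== PORT B =====
-- the while loop of Source B; the hypothesis 1 ≤ i only makes the recursion total
def yaksuLoop (num i : Int) (hi : 1 ≤ i) : Int :=
  if _h : i * i < num then yaksuLoop num (i + 1) (by omega) else i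
termination_by (num - i * i).toNat
decreasing_by
  have hlt : i * i < (i + 1) * (i + 1) := by nlinarith
  omega

def is_yaksu_alt (num : Int) : Bool :=
  let i := yaksuLoop num 1 (by norm_num)
  !(i * i == num)

-- ===== PRECONDITION & SPEC =====
def Spec_is_yaksu (num : Int) (out : Bool) : Prop := out = is_yaksu_alt num
instance (num : Int) (out : Bool) : Decidable (Spec_is_yaksu num out) := by unfold Spec_is_yaksu; infer_instance

-- ===== CLAIM (what is proved, stated in full; the proofs are below) =====
def Claim_equal_is_yaksu : Prop := ∀ (num : Int), Dom_is_yaksu num → Spec_is_yaksu num (is_yaksu num)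

-- ===== LEMMAS AND PROOFS =====

-- the while loop hits a square of num iff num has an integer square root ≥ i
theorem yaksuLoop_sq_iff (num i : Int) (hi : 1 ≤ i) :
    yaksuLoop num i hi * yaksuLoop num i hi = num ↔ ∃ k : Int, i ≤ k ∧ k * k = num := by
  fun_induction yaksuLoop num i hi with
  | case1 i hi h ih =>
      rw [ih]
      constructor
      · rintro ⟨k, hk, hkk⟩; exact ⟨k, by omega, hkk⟩
      · rintro ⟨k, hk, hkk⟩
        refine ⟨k, ?_, hkk⟩
        have hne : k ≠ i := by
          intro e; rw [e] at hkk; omega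
        omega
  | case2 i hi h =>
      constructor
      · intro he; exact ⟨i, le_refl i, he⟩
      · rintro ⟨k, hk, hkk⟩
        have hki : k ≤ i := by
          by_contra hc
          push_neg at hc
          nlinarith
        have hik : k = i := le_antisymm hki hk
        rw [← hik]; exact hkk

theorem alt_true_iff (num : Int) :
    is_yaksu_alt num = true ↔ ¬ ∃ k : Int, 1 ≤ k ∧ k * k = num := by
  have h := yaksuLoop_sq_iff num 1 (by norm_num)
  simp only [is_yaksu_alt, Bool.not_eq_true', beq_eq_false_iff_ne, ne_eq]
  exact not_congr h

-- parity of the number of divisors of n ≥ 1: even iff n is not a perfect square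
theorem divisors_card_even_iff (n : ℕ) (hn : 1 ≤ n) :
    Even n.divisors.card ↔ ¬ ∃ k : ℕ, k * k = n := by
  have hLG : (n.divisors.filter (fun d => d * d < n)).card
      = (n.divisors.filter (fun d => n < d * d)).card := by
    apply Finset.card_nbij' (i := fun d => n / d) (j := fun d => n / d)
    · intro d hd
      simp only [Finset.coe_filter, Set.mem_setOf_eq, Nat.mem_divisors] at *
      obtain ⟨⟨hdvd, hn0⟩, hlt⟩ := hd
      have hd0 : 0 < d := Nat.pos_of_dvd_of_pos hdvd (by omega)
      obtain ⟨c, hc⟩ := hdvd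
      have hcval : n / d = c := by rw [hc]; exact Nat.mul_div_cancel_left c hd0
      have hdc : d < c := by nlinarith
      refine ⟨⟨Nat.div_dvd_of_dvd ⟨c, hc⟩, hn0⟩, ?_⟩
      rw [hcval]
      nlinarith
    · intro d hd
      simp only [Finset.coe_filter, Set.mem_setOf_eq, Nat.mem_divisors] at *
      obtain ⟨⟨hdvd, hn0⟩, hlt⟩ := hd
      have hd0 : 0 < d := Nat.pos_of_dvd_of_pos hdvd (by omega)
      obtain ⟨c, hc⟩ := hdvd
      have hcval : n / d = c := by rw [hc]; exact Nat.mul_div_cancel_left c hd0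
      have hc0 : 0 < c := by
        rcases Nat.eq_zero_or_pos c with rfl | hc0
        · simp at hc; omega
        · exact hc0
      have hcd : c < d := by nlinarith
      refine ⟨⟨Nat.div_dvd_of_dvd ⟨c, hc⟩, hn0⟩, ?_⟩
      rw [hcval]
      nlinarith
    · intro d hd
      simp only [Finset.coe_filter, Set.mem_setOf_eq, Nat.mem_divisors] at hd
      exact Nat.div_div_self hd.1.1 hd.1.2
    · intro d hd
      simp only [Finset.coe_filter, Set.mem_setOf_eq, Nat.mem_divisors] at hd
      exact Nat.div_div_self hd.1.1 hd.1.2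
  have h1 := Finset.filter_card_add_filter_neg_card_eq_card
    (s := n.divisors) (p := fun d => d * d < n)
  have h2 := Finset.filter_card_add_filter_neg_card_eq_card
    (s := n.divisors.filter (fun d => ¬ d * d < n)) (p := fun d => d * d = n)
  have e1 : (n.divisors.filter (fun d => ¬ d * d < n)).filter (fun d => d * d = n)
      = n.divisors.filter (fun d => d * d = n) := by
    ext d
    simp only [Finset.mem_filter, Nat.not_lt]
    constructor
    · rintro ⟨⟨hd, _⟩, he⟩; exact ⟨hd, he⟩
    · rintro ⟨hd, he⟩; exact ⟨⟨hd, he ▸ le_rfl⟩, he⟩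
  have e2 : (n.divisors.filter (fun d => ¬ d * d < n)).filter (fun d => ¬ d * d = n)
      = n.divisors.filter (fun d => n < d * d) := by
    ext d
    simp only [Finset.mem_filter, Nat.not_lt]
    constructor
    · rintro ⟨⟨hd, hle⟩, hne⟩; exact ⟨hd, lt_of_le_of_ne hle (Ne.symm hne)⟩
    · rintro ⟨hd, hlt⟩; exact ⟨⟨hd, le_of_lt hlt⟩, fun e => Nat.lt_irrefl n (e ▸ hlt)⟩
  rw [e1, e2] at h2
  by_cases hsq : ∃ k : ℕ, k * k = n
  · obtain ⟨k, hk⟩ := hsq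
    have hE : n.divisors.filter (fun d => d * d = n) = {k} := by
      ext d
      simp only [Finset.mem_filter, Finset.mem_singleton, Nat.mem_divisors]
      constructor
      · rintro ⟨_, hdd⟩
        exact Nat.mul_self_inj.mp (by rw [hdd, ← hk])
      · rintro rfl
        exact ⟨⟨⟨d, hk.symm⟩, by omega⟩, hk⟩
    rw [hE, Finset.card_singleton] at h2
    have hodd : ¬ Even n.divisors.card := by
      rw [Nat.even_iff]
      omega
    exact iff_of_false hodd (not_not_intro ⟨k, hk⟩)
  · have hE : n.divisors.filter (fun d => d * d = n) = ∅ := by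
      ext d
      simp only [Finset.mem_filter, Finset.notMem_empty, iff_false, not_and]
      exact fun _ hdd => hsq ⟨d, hdd⟩
    rw [hE, Finset.card_empty] at h2
    refine iff_of_true ⟨(n.divisors.filter (fun d => d * d < n)).card, by omega⟩ hsq

theorem countP_range_eq (p : ℕ → Bool) (n : ℕ) :
    (List.range n).countP p = ((Finset.range n).filter (fun k => p k = true)).card := by
  induction n with
  | zero => simp
  | succ m ih =>
      rw [List.range_succ, List.countP_append, Finset.range_add_one, Finset.filter_insert]
      by_cases h : p m = true <;>
        simp [h, ih, Finset.card_insert_of_notMem, Finset.notMem_range_self]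

theorem filter_range_card_eq_divisors (n : ℕ) (hn : 1 ≤ n) :
    ((Finset.range n).filter (fun k => (k + 1) ∣ n)).card = n.divisors.card := by
  apply Finset.card_nbij' (i := fun k => k + 1) (j := fun d => d - 1)
  · intro a ha
    simp only [Finset.coe_filter, Set.mem_setOf_eq, Finset.mem_range, Finset.mem_coe,
      Nat.mem_divisors] at *
    exact ⟨ha.2, by omega⟩
  · intro d hd
    simp only [Finset.coe_filter, Set.mem_setOf_eq, Finset.mem_range, Finset.mem_coe,
      Nat.mem_divisors] at *
    have h1 : 0 < d := Nat.pos_of_dvd_of_pos hd.1 (by omega)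
    have hle : d ≤ n := Nat.le_of_dvd (by omega) hd.1
    have he : d - 1 + 1 = d := by omega
    exact ⟨by omega, by rw [he]; exact hd.1⟩
  · intro a _
    show a + 1 - 1 = a
    omega
  · intro d hd
    simp only [Finset.mem_coe, Nat.mem_divisors] at hd
    have h1 : 0 < d := Nat.pos_of_dvd_of_pos hd.1 (by omega)
    show d - 1 + 1 = d
    omega

theorem a_true_iff (num : Int) :
    is_yaksu num = true ↔ ¬ ∃ k : Int, 1 ≤ k ∧ k * k = num := by
  simp only [is_yaksu, PySem.List.foldl_if_add_one, zero_add]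
  rw [PySem.Int.mod_eq_emod_of_pos (by norm_num : (0:Int) < 2)]
  rcases le_or_gt num 0 with hle | hpos
  · rw [PySem.List.pyRange_one_eq_nil (by omega)]
    simp only [List.countP_nil, Nat.cast_zero]
    refine iff_of_true (by norm_num) ?_
    rintro ⟨k, hk1, hkk⟩
    nlinarith
  · have hnum : num = ((num.toNat : ℕ) : Int) := (Int.toNat_of_nonneg (by omega)).symm
    have hn1 : 1 ≤ num.toNat := by omega
    have hcnt : (PySem.List.pyRange 1 (num + 1) 1).countP
        (fun i => PySem.Int.mod num i == 0) = num.toNat.divisors.card := by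
      rw [PySem.List.pyRange_one]
      rw [List.countP_map]
      rw [List.countP_congr (q := fun k => decide ((k + 1) ∣ num.toNat)) ?_]
      · rw [countP_range_eq]
        have : ((Finset.range num.toNat).filter
            (fun k => decide ((k + 1) ∣ num.toNat) = true))
            = (Finset.range num.toNat).filter (fun k => (k + 1) ∣ num.toNat) := by
          apply Finset.filter_congr
          intro k _
          simp
        have h2 : (num + 1 - 1).toNat = num.toNat := by omega
        rw [h2, this, filter_range_card_eq_divisors _ hn1]
      · intro k _
        simp only [Function.comp_apply, beq_iff_eq, decide_eq_true_eq,
          PySem.Int.mod_eq_zero_iff_dvd]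
        rw [hnum]
        rw [show (1 + (k : Int)) = (((k + 1 : ℕ)) : Int) by push_cast; ring]
        exact Int.natCast_dvd_natCast
    rw [hcnt]
    have hexiff : (∃ k : ℕ, k * k = num.toNat) ↔ ∃ k : Int, 1 ≤ k ∧ k * k = num := by
      constructor
      · rintro ⟨k, hk⟩
        have hk0 : 0 < k := by nlinarith
        refine ⟨(k : Int), by exact_mod_cast hk0, ?_⟩
        rw [hnum]
        exact_mod_cast hk
      · rintro ⟨k, hk1, hkk⟩
        refine ⟨k.toNat, ?_⟩
        have hkt : ((k.toNat : ℕ) : Int) = k := Int.toNat_of_nonneg (by omega)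
        have : ((k.toNat * k.toNat : ℕ) : Int) = ((num.toNat : ℕ) : Int) := by
          push_cast [hkt]
          rw [← hnum]
          exact hkk
        exact_mod_cast this
    have heven : Even (num.toNat.divisors.card) ↔ ¬ ∃ k : Int, 1 ≤ k ∧ k * k = num := by
      rw [divisors_card_even_iff _ hn1]
      exact not_congr hexiff
    constructor
    · intro hA
      rw [← heven, Nat.even_iff]
      split_ifs at hA with h
      · simp only [beq_iff_eq] at h
        omega
    · intro hB
      have hev := heven.mpr hB
      rw [Nat.even_iff] at hev
      have hc : ((num.toNat.divisors.card : Int) % 2 == 0) = true := by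
        simp only [beq_iff_eq]
        omega
      rw [hc]
      simp

-- ===== VERDICT (by name: the statement is the Claim_ definition above) =====
theorem is_yaksu_spec : Claim_equal_is_yaksu := by
  intro num _
  unfold Spec_is_yaksu
  have h1 := a_true_iff num
  have h2 := alt_true_iff num
  rcases Bool.eq_false_or_eq_true (is_yaksu_alt num) with h | h <;>
    rcases Bool.eq_false_or_eq_true (is_yaksu num) with h' | h' <;>
      simp_all
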